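-- pv_equiv track=rewrite | github.com/nobsun/tessoku-book | test/case/B37/etc/testcase_gen.py | solve
-- ===== SOURCE A (Python) =====
-- def solve(x: int) -> int:
--     s = str(x)
--     n = len(s)
--
--     ans = 0
--
--     for i in reversed(range(n)):
--         p = 10 ** (n - i - 1)
--         k = int(s[i])
--         for j in range(1, k):
--             ans += (int('0' + s[:i]) + 1) * j * p
--
--         ans += int('0' + s[:i]) * k * p
--         ans += (int('0' + s[(i + 1):]) + 1) * k
--
--         for j in range(k + 1, 10):
--             ans += int('0' + s[:i]) * j * p
--
--     return ans
-- ===== SOURCE B (Python) =====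
-- def solve(x: int) -> int:
--     # S(x) = sum of digit-sums of 1..x via the divide-by-10 recurrence:
--     # S(10q + r) = 10*S(q) + 45*q + (r - 9)*digsum(q) + r*(r-1)//2 + r
--     def digsum(n: int) -> int:
--         t = 0
--         while n > 0:
--             t += n % 10
--             n //= 10
--         return t
--
--     if x <= 0:
--         return 0
--     q, r = divmod(x, 10)
--     return 10 * solve(q) + 45 * q + (r - 9) * digsum(q) + r * (r - 1) // 2 + r
-- ===== Notes on version B (the rewrite author's own statement) =====
-- stated objective: alternative
-- what changed: A builds the decimal string of x and, for each character position, parses string slices with int() and runs two inner loops over digit values; B never touches strings: it recurses on x with its last decimal digit removed, combining the subresult through a closed-form per-block identity, with a plain arithmetic digit-sum helper.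
-- crash fix: For negative x, A raises ValueError (int() applied to a slice containing the minus sign) while B returns zero, the empty sum over the range from one to x. — e.g. on solve(-7): A raises ValueError, B returns 0
import Mathlib
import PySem

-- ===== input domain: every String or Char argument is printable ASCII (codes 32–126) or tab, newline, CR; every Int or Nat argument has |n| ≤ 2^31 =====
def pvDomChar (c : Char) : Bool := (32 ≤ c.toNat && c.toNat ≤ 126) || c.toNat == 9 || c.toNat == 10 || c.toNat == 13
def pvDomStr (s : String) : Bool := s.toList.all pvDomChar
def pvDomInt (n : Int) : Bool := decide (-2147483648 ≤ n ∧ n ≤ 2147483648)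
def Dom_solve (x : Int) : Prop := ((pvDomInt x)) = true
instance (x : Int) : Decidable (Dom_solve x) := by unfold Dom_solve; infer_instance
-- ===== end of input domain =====

-- B replaces A's string-slicing digit scan by a divide-by-ten recurrence on the value; equivalence is proved on non-negative x (A raises ValueError on negative x).

-- ===== PORT A =====
-- Hand port of Python's int() for this file: every int() call in A receives '0' + a slice of
-- str(x), which inside Pre_solve (x ≥ 0) is a nonempty string of decimal digits; on such
-- strings int() is exactly this left-to-right Horner fold (PySem.Int.ofChars? computes the
-- same value there, but its parser internals are private, which blocks the equivalence proof).
def pyIntDigits (cs : List Char) : Int :=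
  cs.foldl (fun a c => 10 * a + ((c.toNat : Int) - 48)) 0

def solve (x : Int) : Int :=
  let s := PySem.Int.toChars x              -- s = str(x)
  let n := PySem.List.len s                 -- n = len(s)
  -- for i in reversed(range(n)): ...
  ((PySem.List.pyRange 0 n 1).reverse).foldl (fun ans i =>
    let p : Int := 10 ^ (n - i - 1).toNat   -- p = 10 ** (n - i - 1); exponent ≥ 0 for i in range(n)
    let k : Int := pyIntDigits [PySem.List.pyGetD s i '0']   -- k = int(s[i]); i always in range
    -- for j in range(1, k): ans += (int('0' + s[:i]) + 1) * j * p
    let ans := (PySem.List.pyRange 1 k 1).foldl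
      (fun a j => a + (pyIntDigits ('0' :: PySem.List.slice s none (some i)) + 1) * j * p) ans
    -- ans += int('0' + s[:i]) * k * p
    let ans := ans + pyIntDigits ('0' :: PySem.List.slice s none (some i)) * k * p
    -- ans += (int('0' + s[(i + 1):]) + 1) * k
    let ans := ans + (pyIntDigits ('0' :: PySem.List.slice s (some (i + 1)) none) + 1) * k
    -- for j in range(k + 1, 10): ans += int('0' + s[:i]) * j * p
    (PySem.List.pyRange (k + 1) 10 1).foldl
      (fun a j => a + pyIntDigits ('0' :: PySem.List.slice s none (some i)) * j * p) ans) 0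

-- ===== PORT B =====
theorem pv_floordiv_ten_toNat_lt (x : Int) (h : ¬ x ≤ 0) :
    (PySem.Int.floordiv x 10).toNat < x.toNat := by
  rw [PySem.Int.floordiv_eq_ediv_of_pos (by norm_num)]
  omega

-- digsum(n): while n > 0: t += n % 10; n //= 10  (accumulation reassociated: t is a pure sum)
def digsumB (n : Int) : Int :=
  if _h : 0 < n then PySem.Int.mod n 10 + digsumB (PySem.Int.floordiv n 10) else 0
termination_by n.toNat
decreasing_by exact pv_floordiv_ten_toNat_lt n (by omega)

def solve_alt (x : Int) : Int :=
  if h : x ≤ 0 then 0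
  else
    let q := PySem.Int.floordiv x 10
    let r := PySem.Int.mod x 10
    10 * solve_alt q + 45 * q + (r - 9) * digsumB q + PySem.Int.floordiv (r * (r - 1)) 2 + r
termination_by x.toNat
decreasing_by exact pv_floordiv_ten_toNat_lt x h

-- ===== PRECONDITION & SPEC =====
-- Pre_solve excludes exactly the inputs Python A raises on: for negative x, str(x) starts with
-- the minus sign and int() on a prefix slice raises ValueError.
def Pre_solve (x : Int) : Prop := 0 ≤ x
instance (x : Int) : Decidable (Pre_solve x) := by unfold Pre_solve; infer_instance
def pvWitness_solve : Int := (394)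

-- For negative x, A raises ValueError (int() applied to a slice containing the minus sign) while B returns zero, the empty sum over the range from one to x.
def Raises_solve (x : Int) : Prop := x < 0
instance (x : Int) : Decidable (Raises_solve x) := by unfold Raises_solve; infer_instance
def pvRaiseWitness_solve : Int := (-7)
def pvRaiseWitnessOut_solve : Int := 0

def Spec_solve (x : Int) (out : Int) : Prop := out = solve_alt x
instance (x : Int) (out : Int) : Decidable (Spec_solve x out) := by unfold Spec_solve; infer_instance

-- ===== CLAIM (what is proved, stated in full; the proofs are below) =====
def Claim_equal_solve : Prop := ∀ (x : Int), Dom_solve x → Pre_solve x → Spec_solve x (solve x)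
def Claim_raises_solve : Prop := (∀ (x : Int), Dom_solve x → Raises_solve x → ¬ Pre_solve x) ∧ (Dom_solve (pvRaiseWitness_solve) ∧ Raises_solve (pvRaiseWitness_solve) ∧ solve_alt (pvRaiseWitness_solve) = pvRaiseWitnessOut_solve)

-- ===== LEMMAS AND PROOFS =====

-- digit-char value, digit-char sum
def chVal (c : Char) : Int := (c.toNat : Int) - 48
def chSum (s : List Char) : Int := (s.map chVal).sum
-- digit sum of a natural number, via its decimal digit characters
def dsum (m : Nat) : Int := chSum (Nat.toDigits 10 m)
-- G m = sum of the digit sums of 1..m (the common specification of both programs)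
def G : Nat → Int
  | 0 => 0
  | n + 1 => G n + dsum (n + 1)
-- STriN r = 0 + 1 + ... + (r-1)
def STriN : Nat → Int
  | 0 => 0
  | r + 1 => STriN r + r

def AllDigit (s : List Char) : Prop := ∀ c ∈ s, c.isDigit = true

-- the contribution A's loop body adds for position i of the digit string s
def cterm (s : List Char) (i : Nat) : Int :=
  45 * pyIntDigits (s.take i) * 10 ^ (s.length - 1 - i)
    + STriN (chVal (s.getD i '0')).toNat * 10 ^ (s.length - 1 - i)
    + chVal (s.getD i '0') * (pyIntDigits (s.drop (i + 1)) + 1)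
-- the total A's loop accumulates
def Fsum (s : List Char) : Int := ((List.range s.length).map (cterm s)).sum

theorem chVal_bounds (c : Char) (h : c.isDigit = true) : 0 ≤ chVal c ∧ chVal c ≤ 9 := by
  simp [Char.isDigit, UInt32.le_iff_toNat_le] at h
  unfold chVal
  have hc : c.toNat = c.val.toNat := rfl
  omega

theorem pyIntDigits_cons_zero (l : List Char) : pyIntDigits ('0' :: l) = pyIntDigits l := by
  simp [pyIntDigits]

theorem pyIntDigits_append_singleton (l : List Char) (c : Char) :
    pyIntDigits (l ++ [c]) = 10 * pyIntDigits l + chVal c := by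
  simp [pyIntDigits, chVal, List.foldl_append]

theorem chSum_append_singleton (l : List Char) (c : Char) :
    chSum (l ++ [c]) = chSum l + chVal c := by
  simp [chSum]

theorem chVal_digitChar (d : Nat) (h : d < 10) : chVal (Nat.digitChar d) = (d : Int) := by
  interval_cases d <;> decide

theorem pyIntDigits_toDigits (m : Nat) : pyIntDigits (Nat.toDigits 10 m) = (m : Int) := by
  induction m using Nat.strong_induction_on with
  | _ m ih =>
    rw [Nat.toDigits_eq_if (by norm_num)]
    split
    · next h =>
      simp [pyIntDigits]
      have := chVal_digitChar m h
      simp [chVal] at this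
      omega
    · next h =>
      rw [pyIntDigits_append_singleton, ih (m / 10) (by omega), chVal_digitChar _ (by omega)]
      push_cast
      omega

theorem dsum_zero : dsum 0 = 0 := by decide

theorem dsum_small (m : Nat) (h : m < 10) : dsum m = (m : Int) := by
  unfold dsum
  rw [Nat.toDigits_of_lt_base h]
  simp [chSum, chVal_digitChar m h]

theorem dsum10 (q r : Nat) (h : r < 10) : dsum (10 * q + r) = dsum q + (r : Int) := by
  rcases Nat.eq_zero_or_pos q with hq | hq
  · subst hq; simp [dsum_small r h, dsum_zero]
  · unfold dsum
    rw [Nat.toDigits_eq_if (by norm_num : (1:Nat) < 10)]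
    rw [if_neg (by omega)]
    have h1 : (10 * q + r) / 10 = q := by omega
    have h2 : (10 * q + r) % 10 = r := by omega
    rw [h1, h2, chSum_append_singleton, chVal_digitChar r h]

theorem Gsucc (n : Nat) : G (n + 1) = G n + dsum (n + 1) := rfl

theorem Gmul (q : Nat) : G (10 * q) = 10 * G q - 9 * dsum q + 45 * (q : Int) := by
  induction q with
  | zero => simp [G, dsum_zero]
  | succ q ih =>
    have e : ∀ t : Nat, 0 < t → t ≤ 10 → G (10 * q + t) = G (10 * q + (t - 1)) + dsum (10 * q + t) := by
      intro t ht h10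
      have hg := Gsucc (10 * q + (t - 1))
      rwa [show (10 * q + (t - 1)) + 1 = 10 * q + t by omega] at hg
    have d : ∀ t : Nat, 0 < t → t < 10 → dsum (10 * q + t) = dsum q + (t : Int) := fun t _ h => dsum10 q t h
    have d10 : dsum (10 * q + 10) = dsum (q + 1) := by
      rw [show 10 * q + 10 = 10 * (q + 1) + 0 by ring, dsum10 (q+1) 0 (by norm_num)]
      simp
    have e1 := e 1 (by norm_num) (by norm_num)
    have e2 := e 2 (by norm_num) (by norm_num)
    have e3 := e 3 (by norm_num) (by norm_num)
    have e4 := e 4 (by norm_num) (by norm_num)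
    have e5 := e 5 (by norm_num) (by norm_num)
    have e6 := e 6 (by norm_num) (by norm_num)
    have e7 := e 7 (by norm_num) (by norm_num)
    have e8 := e 8 (by norm_num) (by norm_num)
    have e9 := e 9 (by norm_num) (by norm_num)
    have e10 := e 10 (by norm_num) (by norm_num)
    rw [show 10 * (q + 1) = 10 * q + 10 by ring] at *
    rw [e10, e9, e8, e7, e6, e5, e4, e3, e2, e1] at *
    norm_num at *
    rw [d10] at *
    rw [d 1 (by norm_num) (by norm_num), d 2 (by norm_num) (by norm_num), d 3 (by norm_num) (by norm_num),
      d 4 (by norm_num) (by norm_num), d 5 (by norm_num) (by norm_num), d 6 (by norm_num) (by norm_num),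
      d 7 (by norm_num) (by norm_num), d 8 (by norm_num) (by norm_num), d 9 (by norm_num) (by norm_num)] at *
    have hG1 : G (q + 1) = G q + dsum (q + 1) := Gsucc q
    rw [ih, hG1]
    push_cast
    ring

theorem Grec (q r : Nat) (h : r < 10) :
    G (10 * q + r) = 10 * G q + ((r : Int) - 9) * dsum q + 45 * (q : Int) + STriN r + (r : Int) := by
  induction r with
  | zero => simpa [STriN] using Gmul q
  | succ r ih =>
    have hr : r < 10 := by omega
    rw [show 10 * q + (r + 1) = (10 * q + r) + 1 by ring, Gsucc, ih hr,
      show (10 * q + r) + 1 = 10 * q + (r + 1) by ring, dsum10 q (r+1) h]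
    show _ = _ + STriN (r+1) + _
    rw [show STriN (r + 1) = STriN r + r from rfl]
    push_cast
    ring

theorem pyRange_low_sum (k : Int) (h0 : 0 ≤ k) (h9 : k ≤ 9) :
    ((PySem.List.pyRange 1 k 1).map (fun j => j)).sum = STriN k.toNat := by
  interval_cases k <;> decide

theorem pyRange_high_sum (k : Int) (h0 : 0 ≤ k) (h9 : k ≤ 9) :
    ((PySem.List.pyRange (k + 1) 10 1).map (fun j => j)).sum = 45 - STriN k.toNat - k := by
  interval_cases k <;> decide

theorem map_mul_shape (l : List Int) (e p : Int) :
    (l.map (fun j => e * j * p)).sum = e * (l.map (fun j => j)).sum * p := by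
  induction l with
  | nil => simp
  | cons a l ih => simp [ih]; ring

-- A's loop body adds exactly cterm s i
theorem body_step (s : List Char) (i : Nat) (hi : i < s.length) (hd : AllDigit s) (ans : Int) :
    (let p : Int := 10 ^ ((PySem.List.len s) - (i : Int) - 1).toNat
     let k : Int := pyIntDigits [PySem.List.pyGetD s (i : Int) '0']
     let ans := (PySem.List.pyRange 1 k 1).foldl
       (fun a j => a + (pyIntDigits ('0' :: PySem.List.slice s none (some (i : Int))) + 1) * j * p) ans
     let ans := ans + pyIntDigits ('0' :: PySem.List.slice s none (some (i : Int))) * k * p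
     let ans := ans + (pyIntDigits ('0' :: PySem.List.slice s (some ((i : Int) + 1)) none) + 1) * k
     (PySem.List.pyRange (k + 1) 10 1).foldl
       (fun a j => a + pyIntDigits ('0' :: PySem.List.slice s none (some (i : Int))) * j * p) ans)
    = ans + cterm s i := by
  have hlen : PySem.List.len s = (s.length : Int) := PySem.List.len_eq s
  have hexp : ((s.length : Int) - (i : Int) - 1).toNat = s.length - 1 - i := by omega
  have hget : PySem.List.pyGetD s (i : Int) '0' = s.getD i '0' := PySem.List.pyGetD_natCast s i '0'
  have hsl1 : PySem.List.slice s none (some (i : Int)) = s.take i := PySem.List.slice_to_natCast s i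
  have hsl2 : PySem.List.slice s (some ((i : Int) + 1)) none = s.drop (i + 1) := by
    rw [show ((i : Int) + 1) = ((i + 1 : Nat) : Int) by push_cast; ring]
    exact PySem.List.slice_from_natCast s (i + 1)
  have hk1 : pyIntDigits [s.getD i '0'] = chVal (s.getD i '0') := by
    simp [pyIntDigits, chVal]
  have hmem : s.getD i '0' ∈ s := by
    rw [List.getD_eq_getElem s '0' hi]
    exact List.getElem_mem hi
  obtain ⟨hk0, hk9⟩ := chVal_bounds _ (hd _ hmem)
  simp only [hlen, hexp, hget, hsl1, hsl2, hk1, pyIntDigits_cons_zero]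
  rw [PySem.List.foldl_add, PySem.List.foldl_add]
  rw [map_mul_shape, map_mul_shape, pyRange_low_sum _ hk0 hk9, pyRange_high_sum _ hk0 hk9]
  unfold cterm
  ring

-- A's program computes Fsum of the digit string of x
theorem solve_eq_Fsum (x : Int) (hx : 0 ≤ x) : solve x = Fsum (Nat.toDigits 10 x.toNat) := by
  unfold solve
  have hs : PySem.Int.toChars x = Nat.toDigits 10 x.toNat := by
    unfold PySem.Int.toChars
    rw [if_neg (by omega)]
  rw [hs]
  set s := Nat.toDigits 10 x.toNat with hsdef
  dsimp only []
  have hd : AllDigit s := fun c hc => Nat.isDigit_of_mem_toDigits (by norm_num) (by norm_num) hc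
  have hlen : PySem.List.len s = (s.length : Int) := PySem.List.len_eq s
  rw [hlen, PySem.List.pyRange_one]
  simp only [Int.sub_zero, Int.toNat_natCast, List.map_reverse.symm]
  rw [List.foldl_map]
  rw [PySem.List.foldl_congr_mem _ _
    (fun ans (j : Nat) => ans + cterm s j) 0
    (by
      intro acc j hj
      rw [List.mem_reverse, List.mem_range] at hj
      have := body_step s j hj hd acc
      simpa using this)]
  rw [PySem.List.foldl_add]
  simp [Fsum, List.sum_reverse]

theorem range_map_getD (s : List Char) :
    (List.range s.length).map (fun i => chVal (s.getD i '0')) = s.map chVal := by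
  apply List.ext_getElem
  · simp
  · intro i h1 h2
    simp at h1 ⊢
    simp [List.getElem?_eq_getElem h1]

-- main invariant: A's total over any digit string equals G of its value
theorem Fsum_eq_G (s : List Char) (hd : AllDigit s) :
    Fsum s = G (pyIntDigits s).toNat ∧ chSum s = dsum (pyIntDigits s).toNat ∧ 0 ≤ pyIntDigits s := by
  induction s using List.reverseRecOn with
  | nil => exact ⟨by decide, by decide, by decide⟩
  | append_singleton s c ih =>
    have hds : AllDigit s := fun d hds => hd d (by simp [hds])
    have hdc : c.isDigit = true := hd c (by simp)
    obtain ⟨ihF, ihS, ihV⟩ := ih hds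
    obtain ⟨hk0, hk9⟩ := chVal_bounds c hdc
    set V := pyIntDigits s with hV
    set k := chVal c with hk
    have hval : pyIntDigits (s ++ [c]) = 10 * V + k := pyIntDigits_append_singleton s c
    have htoNat : (10 * V + k).toNat = 10 * V.toNat + k.toNat := by omega
    have hkcast : ((k.toNat : Nat) : Int) = k := by omega
    have hVcast : ((V.toNat : Nat) : Int) = V := by omega
    have hlast : cterm (s ++ [c]) s.length = 45 * V + STriN k.toNat + k := by
      unfold cterm
      rw [show (s ++ [c]).length = s.length + 1 by simp]
      rw [List.take_left]
      rw [show (s ++ [c]).getD s.length '0' = c by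
        rw [List.getD_eq_getElem _ '0' (by simp)]
        exact List.getElem_concat_length rfl _]
      rw [List.drop_eq_nil_of_le (by simp)]
      simp [pyIntDigits]
      rfl
    have hpoint : ∀ i, i < s.length → cterm (s ++ [c]) i
        = 10 * cterm s i + chVal (s.getD i '0') * (k - 9) := by
      intro i hi
      unfold cterm
      rw [show (s ++ [c]).length = s.length + 1 by simp]
      rw [List.take_append_of_le_length (by omega)]
      rw [show (s ++ [c]).getD i '0' = s.getD i '0' by
        rw [List.getD_eq_getElem _ '0' (by simp; omega), List.getD_eq_getElem s '0' (by omega)]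
        exact List.getElem_append_left (by omega)]
      rw [List.drop_append_of_le_length (by omega)]
      rw [pyIntDigits_append_singleton]
      rw [show s.length + 1 - 1 - i = (s.length - 1 - i) + 1 by omega]
      rw [pow_succ]
      ring
    have hsum : Fsum (s ++ [c]) = 10 * Fsum s + (k - 9) * chSum s + (45 * V + STriN k.toNat + k) := by
      unfold Fsum
      rw [show (s ++ [c]).length = s.length + 1 by simp]
      rw [List.range_succ, List.map_append, List.sum_append]
      simp only [List.map_cons, List.map_nil, List.sum_cons, List.sum_nil, add_zero]
      rw [hlast]
      rw [List.map_congr_left (fun i hi => hpoint i (List.mem_range.mp hi))]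
      have : (List.map (fun i => 10 * cterm s i + chVal (s.getD i '0') * (k - 9)) (List.range s.length)).sum
          = 10 * ((List.range s.length).map (cterm s)).sum
            + ((List.range s.length).map (fun i => chVal (s.getD i '0'))).sum * (k - 9) := by
        rw [List.sum_map_add]
        congr 1
        · rw [← List.sum_map_mul_left]
        · rw [← List.sum_map_mul_right]
      rw [this, range_map_getD]
      show _ = 10 * Fsum s + (k - 9) * chSum s + _
      unfold Fsum chSum
      ring
    refine ⟨?_, ?_, by omega⟩
    · rw [hsum, hval, htoNat, Grec V.toNat k.toNat (by omega), ihF, ihS, hkcast, hVcast]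
      ring
    · rw [chSum_append_singleton, hval, htoNat, dsum10 V.toNat k.toNat (by omega), ihS, hkcast]

-- B side: digsumB computes dsum, solve_alt computes G
theorem digsumB_eq_aux (m : Nat) : ∀ (n : Int), 0 ≤ n → n.toNat = m → digsumB n = dsum m := by
  induction m using Nat.strong_induction_on with
  | _ m ih =>
    intro n hn hm
    rw [digsumB]
    split
    · next hpos =>
      have hq : PySem.Int.floordiv n 10 = n / 10 := PySem.Int.floordiv_eq_ediv_of_pos (by norm_num)
      have hr : PySem.Int.mod n 10 = n % 10 := PySem.Int.mod_eq_emod_of_pos (by norm_num)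
      rw [hq, hr, ih (m / 10) (by omega) (n / 10) (by omega) (by omega)]
      have hnm : n % 10 = ((m % 10 : Nat) : Int) := by omega
      rw [hnm, show dsum m = dsum (10 * (m / 10) + m % 10) from by rw [Nat.div_add_mod]]
      rw [dsum10 _ _ (by omega)]
      ring
    · next hpos =>
      have : m = 0 := by omega
      simp [this, dsum_zero]

theorem digsumB_eq (n : Int) (hn : 0 ≤ n) : digsumB n = dsum n.toNat :=
  digsumB_eq_aux n.toNat n hn rfl

theorem STri_div (r : Int) (h0 : 0 ≤ r) (h9 : r ≤ 9) :
    PySem.Int.floordiv (r * (r - 1)) 2 = STriN r.toNat := by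
  interval_cases r <;> decide

theorem solve_alt_eq_aux (m : Nat) : ∀ (x : Int), 0 ≤ x → x.toNat = m → solve_alt x = G m := by
  induction m using Nat.strong_induction_on with
  | _ m ih =>
    intro x hx hm
    rw [solve_alt]
    split
    · next hle =>
      have : m = 0 := by omega
      simp [this, G]
    · next hle =>
      have hq : PySem.Int.floordiv x 10 = x / 10 := PySem.Int.floordiv_eq_ediv_of_pos (by norm_num)
      have hr : PySem.Int.mod x 10 = x % 10 := PySem.Int.mod_eq_emod_of_pos (by norm_num)
      simp only [hq, hr]
      have hr0 : 0 ≤ x % 10 := by omega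
      have hr9 : x % 10 ≤ 9 := by omega
      rw [ih (m / 10) (by omega) (x / 10) (by omega) (by omega),
        digsumB_eq _ (by omega), STri_div _ hr0 hr9]
      have hsplit : m = 10 * (m / 10) + (x % 10).toNat := by omega
      rw [show G m = G (10 * (m / 10) + (x % 10).toNat) by rw [← hsplit]]
      rw [Grec (m / 10) (x % 10).toNat (by omega)]
      have h2 : (((x % 10).toNat : Nat) : Int) = x % 10 := by omega
      have h3 : ((m / 10 : Nat) : Int) = x / 10 := by omega
      have h4 : (x / 10).toNat = m / 10 := by omega
      rw [h2, h3, h4]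
      ring

-- ===== VERDICT (by name: the statement is the Claim_ definition above) =====
theorem solve_spec : Claim_equal_solve := by
  intro x _ hx
  unfold Spec_solve
  have hd : AllDigit (Nat.toDigits 10 x.toNat) :=
    fun c hc => Nat.isDigit_of_mem_toDigits (by norm_num) (by norm_num) hc
  obtain ⟨hF, _, _⟩ := Fsum_eq_G (Nat.toDigits 10 x.toNat) hd
  rw [solve_eq_Fsum x hx, hF, pyIntDigits_toDigits, Int.toNat_natCast,
    solve_alt_eq_aux x.toNat x hx rfl]

theorem solve_raises : Claim_raises_solve := by
  unfold Claim_raises_solve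
  refine ⟨fun x _ h => by unfold Raises_solve Pre_solve at *; omega, by decide, by decide, ?_⟩
  rw [solve_alt]
  norm_num [pvRaiseWitness_solve, pvRaiseWitnessOut_solve]

-- self-check: the crash-fix witness satisfies Raises_solve and B's port returns the stated value there
theorem pvRaiseWitness_ok :
    Raises_solve pvRaiseWitness_solve ∧ solve_alt pvRaiseWitness_solve = pvRaiseWitnessOut_solve := by
  have h := solve_raises
  unfold Claim_raises_solve at h
  exact ⟨h.2.2.1, h.2.2.2⟩
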